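-- pv_equiv track=rewrite | github.com/markxbrooks/MoLib | molib/pdb/structure/kabsch_sander.py | hbond_key
-- ===== SOURCE A (Python) =====
-- from typing import Dict, List, Optional, Tuple, Union
--
-- def hbond_key(nres: int, nhb: int, hbonds: List[Tuple[int, int]]) -> List[str]:
--     """
--     Create H-bond key array.
--
--     Based on hbond_key() in pdb-pro-ss.C
--
--     Args:
--         nres: Number of residues (1-indexed)
--         nhb: Number of H-bonds
--         hbonds: List of (CO_index, NH_index) tuples
--
--     Returns:
--         Array of length nres+1 with H-bond keys:
--         'O' = CO makes H-bond, 'H' = NH makes H-bond,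
--         'B' = both, '.' = none
--     """
--     ho = [" "] * (nres + 1)
--
--     for co_idx, nh_idx in hbonds:
--         co = co_idx
--         nh = nh_idx
--
--         if ho[co] == "H":
--             ho[co] = "B"
--         else:
--             if ho[co] == " ":
--                 ho[co] = "O"
--
--         if ho[nh] == "O":
--             ho[nh] = "B"
--         else:
--             if ho[nh] == " ":
--                 ho[nh] = "H"
--
--     for i in range(1, nres + 1):
--         if ho[i] == " ":
--             ho[i] = "."
--
--     return ho
-- ===== SOURCE B (Python) =====
-- from typing import List, Tuple
--
-- def hbond_key(nres: int, nhb: int, hbonds: List[Tuple[int, int]]) -> List[str]: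
--     """Flag-gathering reimplementation: collect CO/NH flags, then combine."""
--     co_flag = [False] * (nres + 1)
--     nh_flag = [False] * (nres + 1)
--     for co, nh in hbonds:
--         co_flag[co] = True
--         nh_flag[nh] = True
--     result = []
--     for i in range(nres + 1):
--         c, h = co_flag[i], nh_flag[i]
--         if c and h:
--             result.append("B")
--         elif c:
--             result.append("O")
--         elif h:
--             result.append("H")
--         else:
--             result.append("." if i >= 1 else " ")
--     return result
-- ===== Notes on version B (the rewrite author's own statement) =====
-- stated objective: simpler
-- what changed: Replaces A's per-hbond O/H/B in-place state machine plus '.'-fill pass by gathering two boolean flag arrays (CO and NH) in one loop and deriving each output character from the two flags in a single combining pass.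
import Mathlib
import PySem

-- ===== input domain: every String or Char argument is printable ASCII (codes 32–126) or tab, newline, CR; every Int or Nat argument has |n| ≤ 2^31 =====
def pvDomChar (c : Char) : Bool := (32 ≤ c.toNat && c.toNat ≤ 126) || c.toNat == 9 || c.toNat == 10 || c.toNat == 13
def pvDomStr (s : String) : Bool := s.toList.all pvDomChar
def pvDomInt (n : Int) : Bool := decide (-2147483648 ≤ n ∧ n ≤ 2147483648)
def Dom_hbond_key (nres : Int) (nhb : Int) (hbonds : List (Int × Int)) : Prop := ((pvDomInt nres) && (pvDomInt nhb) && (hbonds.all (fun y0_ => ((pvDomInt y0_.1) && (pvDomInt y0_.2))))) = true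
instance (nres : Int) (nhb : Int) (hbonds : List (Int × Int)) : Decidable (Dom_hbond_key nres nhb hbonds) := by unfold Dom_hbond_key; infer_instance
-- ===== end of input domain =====

-- B replaces A's per-hbond O/H/B state machine by a flag-gathering pass plus one combining pass (objective: simpler decomposition).

-- ===== PORT A =====
-- the CO-side if/else block of A's loop body
def coStep (ho : List String) (co : Int) : List String :=
  if PySem.List.pyGetD ho co "" = "H" then PySem.List.pySetD ho co "B"
  else if PySem.List.pyGetD ho co "" = " " then PySem.List.pySetD ho co "O" else ho

-- the NH-side if/else block of A's loop body (runs on the CO-updated state)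
def nhStep (ho : List String) (nh : Int) : List String :=
  if PySem.List.pyGetD ho nh "" = "O" then PySem.List.pySetD ho nh "B"
  else if PySem.List.pyGetD ho nh "" = " " then PySem.List.pySetD ho nh "H" else ho

def hbond_key (nres : Int) (nhb : Int) (hbonds : List (Int × Int)) : List String :=
  let ho0 : List String := List.replicate (nres + 1).toNat " "
  let ho1 := hbonds.foldl (fun ho p => nhStep (coStep ho p.1) p.2) ho0
  (PySem.List.pyRange 1 (nres + 1) 1).foldl (fun ho i =>
    if PySem.List.pyGetD ho i "" = " " then PySem.List.pySetD ho i "." else ho) ho1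

-- ===== PORT B =====
def hbond_key_alt (nres : Int) (nhb : Int) (hbonds : List (Int × Int)) : List String :=
  let flags := hbonds.foldl (fun (fl : List Bool × List Bool) p =>
      (PySem.List.pySetD fl.1 p.1 true, PySem.List.pySetD fl.2 p.2 true))
    (List.replicate (nres + 1).toNat false, List.replicate (nres + 1).toNat false)
  (PySem.List.pyRange 0 (nres + 1) 1).foldl (fun res i =>
    let c := PySem.List.pyGetD flags.1 i false
    let h := PySem.List.pyGetD flags.2 i false
    res ++ [if c && h then "B" else if c then "O" else if h then "H"
            else if 1 ≤ i then "." else " "]) []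

-- ===== PRECONDITION & SPEC =====
-- Pre_ excludes exactly the inputs where Python raises IndexError: some hbond index out of range of the length-(nres+1) array.
def Pre_hbond_key (nres : Int) (nhb : Int) (hbonds : List (Int × Int)) : Prop :=
  ∀ p ∈ hbonds, PySem.Raise.InRange (nres + 1).toNat p.1 ∧ PySem.Raise.InRange (nres + 1).toNat p.2
instance (nres : Int) (nhb : Int) (hbonds : List (Int × Int)) : Decidable (Pre_hbond_key nres nhb hbonds) := by unfold Pre_hbond_key; infer_instance

def pvWitness_hbond_key : Int × Int × (List (Int × Int)) := (2, 1, [(1, 2)])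

def Spec_hbond_key (nres : Int) (nhb : Int) (hbonds : List (Int × Int)) (out : List String) : Prop := out = hbond_key_alt nres nhb hbonds
instance (nres : Int) (nhb : Int) (hbonds : List (Int × Int)) (out : List String) : Decidable (Spec_hbond_key nres nhb hbonds out) := by unfold Spec_hbond_key; infer_instance

-- ===== CLAIM (what is proved, stated in full; the proofs are below) =====
def Claim_equal_hbond_key : Prop := ∀ (nres : Int) (nhb : Int) (hbonds : List (Int × Int)), Dom_hbond_key nres nhb hbonds → Pre_hbond_key nres nhb hbonds → Spec_hbond_key nres nhb hbonds (hbond_key nres nhb hbonds)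

-- ===== LEMMAS AND PROOFS =====

-- Python's index normalisation (valid under Raise.InRange).
def nrm (L : Nat) (i : Int) : Nat := if 0 ≤ i then i.toNat else L - (-i).toNat

-- the rendering of a (CO-flag, NH-flag) pair
def rnd (c h : Bool) : String := if c && h then "B" else if c then "O" else if h then "H" else " "

theorem nrm_lt {L : Nat} {i : Int} (h : PySem.Raise.InRange L i) : nrm L i < L := by
  obtain ⟨h1, h2⟩ := h
  unfold nrm
  split_ifs with h0 <;> omega

theorem pyIdx_eq {L : Nat} {i : Int} (h : PySem.Raise.InRange L i) :
    PySem.List.pyIdx? L i = some (nrm L i) := by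
  obtain ⟨ha, hb⟩ := h
  simp only [PySem.List.pyIdx?, nrm]
  by_cases h0 : 0 ≤ i
  · simp [h0, hb]
  · simp [h0, ha]

theorem getD_map_range {α : Type} (f : Nat → α) {L : Nat} {i : Int}
    (h : PySem.Raise.InRange L i) (d : α) :
    PySem.List.pyGetD ((List.range L).map f) i d = f (nrm L i) := by
  simp only [PySem.List.pyGetD, PySem.List.pyGet?, List.length_map, List.length_range,
    pyIdx_eq h, Option.bind_some]
  rw [List.getElem?_map, List.getElem?_range (nrm_lt h)]
  rfl

theorem setD_map_range {α : Type} (f : Nat → α) {L : Nat} {i : Int}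
    (h : PySem.Raise.InRange L i) (v : α) :
    PySem.List.pySetD ((List.range L).map f) i v
      = (List.range L).map (fun j => if j = nrm L i then v else f j) := by
  simp only [PySem.List.pySetD, PySem.List.pySet?, List.length_map, List.length_range,
    pyIdx_eq h, Option.map_some, Option.getD_some]
  apply List.ext_getElem
  · simp
  · intro k hk hk'
    simp only [List.length_set, List.length_map, List.length_range] at hk
    rw [List.getElem_set]
    simp only [List.getElem_map, List.getElem_range]
    by_cases hm : k = nrm L i
    · simp [hm]
    · simp [hm, Ne.symm hm]

-- effect of A's CO-update block on a rendered state
theorem upd_co (cb hbf : Nat → Bool) {L : Nat} {i : Int} (h : PySem.Raise.InRange L i) :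
    coStep ((List.range L).map (fun j => rnd (cb j) (hbf j))) i
    = (List.range L).map (fun j => rnd (cb j || decide (j = nrm L i)) (hbf j)) := by
  simp only [coStep, getD_map_range _ h, setD_map_range _ h]
  rcases hc : cb (nrm L i) <;> rcases hh : hbf (nrm L i) <;> simp only [rnd, hc, hh]
  · rw [if_neg (by decide), if_pos (by decide)]
    apply List.map_congr_left; intro j _
    by_cases hjn : j = nrm L i <;> simp [hjn, hc, hh]
  · rw [if_pos (by decide)]
    apply List.map_congr_left; intro j _
    by_cases hjn : j = nrm L i <;> simp [hjn, hc, hh]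
  · rw [if_neg (by decide), if_neg (by decide)]
    apply List.map_congr_left; intro j _
    by_cases hjn : j = nrm L i <;> simp [hjn, hc, hh]
  · rw [if_neg (by decide), if_neg (by decide)]
    apply List.map_congr_left; intro j _
    by_cases hjn : j = nrm L i <;> simp [hjn, hc, hh]

-- effect of A's NH-update block on a rendered state
theorem upd_nh (cb hbf : Nat → Bool) {L : Nat} {i : Int} (h : PySem.Raise.InRange L i) :
    nhStep ((List.range L).map (fun j => rnd (cb j) (hbf j))) i
    = (List.range L).map (fun j => rnd (cb j) (hbf j || decide (j = nrm L i))) := by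
  simp only [nhStep, getD_map_range _ h, setD_map_range _ h]
  rcases hc : cb (nrm L i) <;> rcases hh : hbf (nrm L i) <;> simp only [rnd, hc, hh]
  · rw [if_neg (by decide), if_pos (by decide)]
    apply List.map_congr_left; intro j _
    by_cases hjn : j = nrm L i <;> simp [hjn, hc, hh]
  · rw [if_neg (by decide), if_neg (by decide)]
    apply List.map_congr_left; intro j _
    by_cases hjn : j = nrm L i <;> simp [hjn, hc, hh]
  · rw [if_pos (by decide)]
    apply List.map_congr_left; intro j _
    by_cases hjn : j = nrm L i <;> simp [hjn, hc, hh]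
  · rw [if_neg (by decide), if_neg (by decide)]
    apply List.map_congr_left; intro j _
    by_cases hjn : j = nrm L i <;> simp [hjn, hc, hh]

-- A's first loop turns a rendered state into the rendered accumulated flags
theorem foldA (hb : List (Int × Int)) (L : Nat) (cb hbf : Nat → Bool)
    (hpre : ∀ p ∈ hb, PySem.Raise.InRange L p.1 ∧ PySem.Raise.InRange L p.2) :
    hb.foldl (fun ho p => nhStep (coStep ho p.1) p.2)
      ((List.range L).map (fun j => rnd (cb j) (hbf j)))
    = (List.range L).map (fun j =>
        rnd (cb j || hb.any (fun p => decide (j = nrm L p.1)))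
            (hbf j || hb.any (fun p => decide (j = nrm L p.2)))) := by
  induction hb generalizing cb hbf with
  | nil => simp
  | cons p t ih =>
    obtain ⟨hp1, hp2⟩ := hpre p (List.mem_cons_self)
    rw [List.foldl_cons]
    rw [upd_co cb hbf hp1]
    rw [upd_nh (fun j => cb j || decide (j = nrm L p.1)) hbf hp2]
    rw [ih _ _ (fun q hq => hpre q (List.mem_cons_of_mem p hq))]
    apply List.map_congr_left
    intro j _
    simp [Bool.or_assoc]

-- A's second loop fills '.' at positions ≥ a that are still ' '
theorem dotFill (b : Int) (f : Nat → String) (a : Int) (ha : 0 < a) :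
    (PySem.List.pyRange a b 1).foldl (fun ho i =>
        if PySem.List.pyGetD ho i "" = " " then PySem.List.pySetD ho i "." else ho)
      ((List.range b.toNat).map f)
    = (List.range b.toNat).map (fun (j : Nat) => if a ≤ (j : Int) ∧ f j = " " then "." else f j) := by
  by_cases hab : b ≤ a
  · rw [PySem.List.pyRange_one_eq_nil hab, List.foldl_nil]
    apply List.map_congr_left
    intro j hj
    rw [List.mem_range] at hj
    have : ¬ (a ≤ (j : Int) ∧ f j = " ") := by
      rintro ⟨h1, _⟩; omega
    simp [this]
  · rw [not_le] at hab
    rw [PySem.List.pyRange_one_cons hab, List.foldl_cons]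
    have hin : PySem.Raise.InRange b.toNat a := by constructor <;> omega
    rw [getD_map_range _ hin]
    have hna : nrm b.toNat a = a.toNat := by unfold nrm; simp [le_of_lt ha]
    have hcast : ((a.toNat : Int)) = a := by omega
    by_cases hfa : f (nrm b.toNat a) = " "
    · rw [if_pos hfa, setD_map_range _ hin]
      rw [dotFill b _ (a + 1) (by omega)]
      apply List.map_congr_left
      intro j hj
      rw [List.mem_range] at hj
      by_cases hj' : j = a.toNat
      · subst hj'
        rw [hna] at hfa
        simp only [hcast]
        have h1 : ¬ ((a : Int) + 1 ≤ (a.toNat : Int)) := by omega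
        simp [h1, hfa, hna]
      · have hne : j ≠ nrm b.toNat a := by rw [hna]; exact hj'
        simp only [if_neg hne]
        have : ((a : Int) + 1 ≤ (j : Int)) ↔ (a ≤ (j : Int)) := by omega
        simp only [this]
    · rw [if_neg hfa]
      rw [dotFill b f (a + 1) (by omega)]
      apply List.map_congr_left
      intro j hj
      rw [List.mem_range] at hj
      by_cases hj' : j = a.toNat
      · subst hj'
        rw [hna] at hfa
        simp [hfa]
      · have : ((a : Int) + 1 ≤ (j : Int)) ↔ (a ≤ (j : Int)) := by omega
        simp only [this]
termination_by (b - a).toNat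
decreasing_by all_goals omega

-- B's flag loop accumulates the same membership flags
theorem foldB (hb : List (Int × Int)) (L : Nat) (cb hbf : Nat → Bool)
    (hpre : ∀ p ∈ hb, PySem.Raise.InRange L p.1 ∧ PySem.Raise.InRange L p.2) :
    hb.foldl (fun (fl : List Bool × List Bool) p =>
        (PySem.List.pySetD fl.1 p.1 true, PySem.List.pySetD fl.2 p.2 true))
      ((List.range L).map cb, (List.range L).map hbf)
    = ((List.range L).map (fun j => cb j || hb.any (fun p => decide (j = nrm L p.1))),
       (List.range L).map (fun j => hbf j || hb.any (fun p => decide (j = nrm L p.2)))) := by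
  induction hb generalizing cb hbf with
  | nil => simp
  | cons p t ih =>
    obtain ⟨hp1, hp2⟩ := hpre p (List.mem_cons_self)
    rw [List.foldl_cons]
    have e1 : PySem.List.pySetD ((List.range L).map cb) p.1 true
        = (List.range L).map (fun j => cb j || decide (j = nrm L p.1)) := by
      rw [setD_map_range _ hp1]
      apply List.map_congr_left
      intro j _
      by_cases hj : j = nrm L p.1 <;> simp [hj]
    have e2 : PySem.List.pySetD ((List.range L).map hbf) p.2 true
        = (List.range L).map (fun j => hbf j || decide (j = nrm L p.2)) := by
      rw [setD_map_range _ hp2]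
      apply List.map_congr_left
      intro j _
      by_cases hj : j = nrm L p.2 <;> simp [hj]
    simp only [e1, e2]
    rw [ih _ _ (fun q hq => hpre q (List.mem_cons_of_mem p hq))]
    refine Prod.ext ?_ ?_ <;>
      (apply List.map_congr_left; intro j _; simp [Bool.or_assoc])

-- ===== VERDICT (by name: the statement is the Claim_ definition above) =====
theorem hbond_key_spec : Claim_equal_hbond_key := by
  intro nres nhb hbonds _ hpre
  unfold Spec_hbond_key hbond_key hbond_key_alt
  set L := (nres + 1).toNat with hL
  have hrep : (List.replicate L (" " : String)) = (List.range L).map (fun j => rnd false false) := by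
    simp [List.map_const', rnd]
  have hrepb : (List.replicate L false) = (List.range L).map (fun _ => false) := by
    simp [List.map_const']
  simp only [hrep, hrepb]
  rw [foldA hbonds L _ _ hpre]
  rw [foldB hbonds L _ _ hpre]
  simp only [Bool.false_or]
  -- shape A's result via the dot-filling lemma
  have htn : ((nres + 1)).toNat = L := hL.symm
  rw [show (List.range L) = (List.range (nres+1).toNat) from by rw [htn]]
  rw [dotFill (nres + 1) _ 1 (by omega)]
  -- shape B's result: append-fold over a range is a map
  rw [PySem.List.foldl_append_singleton_eq_map]
  rw [PySem.List.pyRange_one 0 (nres + 1)]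
  rw [List.map_map]
  simp only [Int.sub_zero, htn, List.nil_append]
  apply List.map_congr_left
  intro j hj
  rw [List.mem_range] at hj
  have h0 : PySem.Raise.InRange L ((0 : Int) + (j : Nat)) := by constructor <;> omega
  simp only [Function.comp]
  rw [getD_map_range _ h0, getD_map_range _ h0]
  have hn : nrm L ((0 : Int) + (j : Nat)) = j := by unfold nrm; split_ifs <;> omega
  rw [hn]
  rcases hc : hbonds.any (fun p => decide (j = nrm L p.1)) <;>
    rcases hh : hbonds.any (fun p => decide (j = nrm L p.2)) <;>
    simp only [rnd] <;> norm_num <;>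
    (by_cases h1 : (1 : Int) ≤ (j : Int) <;> simp_all)
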